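-- pv_equiv track=rewrite | github.com/ujin496/Pystudy | 조현아/백준/Silver/3711. 학번/학번.py | id_num
-- ===== SOURCE A (Python) =====
-- def id_num(arr):
--     k = 1
--     while True:
--         empty_list = []  # 새로운 k 값마다 리스트 초기화
--         found_duplicate = False
--
--         for i in range(len(arr)):
--             remainder = arr[i] % k
--             if remainder not in empty_list:
--                 empty_list.append(remainder)
--             else:
--                 found_duplicate = True
--                 break # for문에서 나가서 while문으로 간다,.
--
--         if not found_duplicate:
--             return k  # 모든 나머지가 유일한 k 값을 찾음
--
--         k += 1
-- ===== SOURCE B (Python) =====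
-- def id_num(arr):
--     # Two residues collide mod k exactly when k divides their difference,
--     # so precompute all pairwise absolute differences once and test each k
--     # against that fixed set instead of rebuilding remainder lists per k.
--     diffs = set()
--     seen = []
--     for x in arr:
--         for y in seen:
--             diffs.add(abs(x - y))
--         seen.append(x)
--     k = 1
--     while any(d % k == 0 for d in diffs):
--         k += 1
--     return k
-- ===== Notes on version B (the rewrite author's own statement) =====
-- stated objective: alternative
-- what changed: B precomputes the set of pairwise absolute differences once and returns the first k that divides none of them (k collides two elements exactly when k divides their difference), instead of rebuilding a remainder list with membership scans for every candidate k.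
import Mathlib
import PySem

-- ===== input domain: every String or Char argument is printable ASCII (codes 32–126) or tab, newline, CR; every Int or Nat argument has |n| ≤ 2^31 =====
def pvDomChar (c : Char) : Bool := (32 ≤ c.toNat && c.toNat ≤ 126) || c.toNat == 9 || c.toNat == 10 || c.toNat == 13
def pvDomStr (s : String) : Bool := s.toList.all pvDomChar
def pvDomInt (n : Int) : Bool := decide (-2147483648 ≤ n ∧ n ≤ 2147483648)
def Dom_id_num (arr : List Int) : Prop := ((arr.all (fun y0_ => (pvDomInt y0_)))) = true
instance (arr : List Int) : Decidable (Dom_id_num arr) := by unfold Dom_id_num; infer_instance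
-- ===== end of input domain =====

-- B precomputes the set of pairwise absolute differences once and returns the first k
-- dividing none of them, instead of rebuilding a remainder list for every candidate k.

-- ===== PORT A =====
-- inner for-loop of A: walks the array, appending each remainder to `seen`
-- (empty_list), returning found_duplicate; the `break` is the early `true` return.
def idNumInnerA (k : Int) : List Int → List Int → Bool
  | [], _ => false
  | a :: rest, seen =>
    let r := PySem.Int.mod a k
    if r ∈ seen then true else idNumInnerA k rest (seen ++ [r])

-- `while True` loop of A; the Nat fuel only makes the recursion total (the Python
-- loop diverges on arrays with duplicate values, which Pre_ excludes).
def idNumLoopA (arr : List Int) : Nat → Int → Int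
  | 0, _ => 0
  | fuel + 1, k => if idNumInnerA k arr [] then idNumLoopA arr fuel (k + 1) else k

def id_num (arr : List Int) : Int := idNumLoopA arr (2 ^ 33) 1

-- ===== PORT B =====
-- diffs-building pass of B: state is (diffs set, seen list)
def idNumDiffs (arr : List Int) : PySem.Set Int :=
  (arr.foldl
    (fun (st : PySem.Set Int × List Int) x =>
      (st.2.foldl (fun s y => PySem.Set.add s |x - y|) st.1, st.2 ++ [x]))
    (PySem.Set.empty, [])).1

-- `while any(d % k == 0 for d in diffs)` loop of B (same fuel totalisation as A's port).
def idNumLoopB (diffs : PySem.Set Int) : Nat → Int → Int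
  | 0, _ => 0
  | fuel + 1, k =>
    if diffs.any (fun d => PySem.Int.mod d k == 0) then idNumLoopB diffs fuel (k + 1) else k

def id_num_alt (arr : List Int) : Int := idNumLoopB (idNumDiffs arr) (2 ^ 33) 1

-- ===== PRECONDITION & SPEC =====
-- No Pre_: the ports agree on every input (both use the same fuel bound; the Python
-- originals both diverge on arrays with duplicate values, where neither returns).
def Spec_id_num (arr : List Int) (out : Int) : Prop := out = id_num_alt arr
instance (arr : List Int) (out : Int) : Decidable (Spec_id_num arr out) := by unfold Spec_id_num; infer_instance

-- ===== CLAIM (what is proved, stated in full; the proofs are below) =====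
def Claim_equal_id_num : Prop := ∀ (arr : List Int), Dom_id_num arr → Spec_id_num arr (id_num arr)

-- ===== LEMMAS AND PROOFS =====

-- k ≥ 1: two values collide mod k exactly when k divides their absolute difference
theorem id_num_collide_iff (k x y : Int) (hk : 1 ≤ k) :
    (PySem.Int.mod x k = PySem.Int.mod y k) ↔ PySem.Int.mod |x - y| k = 0 := by
  rw [PySem.Int.mod_eq_emod_of_pos (by omega), PySem.Int.mod_eq_emod_of_pos (by omega),
      PySem.Int.mod_eq_emod_of_pos (by omega), Int.emod_eq_emod_iff_emod_sub_eq_zero,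
      PySem.Int.emod_eq_zero_iff_dvd, PySem.Int.emod_eq_zero_iff_dvd, dvd_abs]

-- A's inner loop reports no duplicate iff the residues (after the seen ones) are all distinct
theorem id_num_innerA_false_iff (k : Int) (l : List Int) : ∀ (seen : List Int), seen.Nodup →
    (idNumInnerA k l seen = false ↔ (seen ++ l.map (fun a => PySem.Int.mod a k)).Nodup) := by
  induction l with
  | nil => intro seen h; simp [idNumInnerA, h]
  | cons a rest ih =>
    intro seen h
    by_cases hmem : PySem.Int.mod a k ∈ seen
    · simp only [idNumInnerA, hmem, reduceIte, Bool.true_eq_false, false_iff, List.map_cons]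
      intro hnd
      have hdisj := List.disjoint_of_nodup_append hnd
      exact hdisj hmem (by simp)
    · rw [idNumInnerA]
      simp only [hmem, reduceIte, List.map_cons]
      rw [ih (seen ++ [PySem.Int.mod a k]) (by
        simp_all [List.nodup_append]
        exact fun a1 ha1 he => hmem (he ▸ ha1))]
      rw [List.append_assoc, List.singleton_append]

theorem id_num_diffs_snd (l : List Int) : ∀ (st : PySem.Set Int × List Int),
    (l.foldl (fun (st : PySem.Set Int × List Int) x =>
      (st.2.foldl (fun s y => PySem.Set.add s |x - y|) st.1, st.2 ++ [x])) st).2 = st.2 ++ l := by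
  induction l with
  | nil => simp
  | cons a rest ih => intro st; rw [List.foldl_cons, ih]; simp

theorem id_num_mem_inner_foldl (ys : List Int) : ∀ (s : PySem.Set Int) (x d : Int),
    (d ∈ ys.foldl (fun s y => PySem.Set.add s |x - y|) s) ↔ d ∈ s ∨ ∃ y ∈ ys, |x - y| = d := by
  induction ys with
  | nil => simp
  | cons a rest ih =>
    intro s x d
    rw [List.foldl_cons, ih, PySem.Set.mem_add]
    constructor
    · rintro ((h | h) | ⟨y, hy, he⟩)
      · exact Or.inl h
      · exact Or.inr ⟨a, by simp, h.symm⟩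
      · exact Or.inr ⟨y, by simp [hy], he⟩
    · rintro (h | ⟨y, hy, he⟩)
      · exact Or.inl (Or.inl h)
      · rcases List.mem_cons.mp hy with rfl | hy'
        · exact Or.inl (Or.inr he.symm)
        · exact Or.inr ⟨y, hy', he⟩

theorem id_num_pair_sublist_concat (y x' : Int) (l : List Int) (x : Int) :
    List.Sublist [y, x'] (l ++ [x]) ↔ List.Sublist [y, x'] l ∨ (x' = x ∧ y ∈ l) := by
  rw [List.sublist_append_iff]
  constructor
  · rintro ⟨l₁, l₂, heq, h1, h2⟩
    rcases List.sublist_singleton.mp h2 with rfl | rfl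
    · rw [List.append_nil] at heq; left; exact heq ▸ h1
    · right
      cases l₁ with
      | nil => simp at heq
      | cons b t =>
        cases t with
        | nil =>
          obtain ⟨rfl, rfl⟩ : y = b ∧ x' = x := by simpa using heq
          exact ⟨rfl, List.singleton_sublist.mp h1⟩
        | cons c t2 => simp at heq
  · rintro (hs | ⟨rfl, hy⟩)
    · exact ⟨[y, x'], [], by simp, hs, by simp⟩
    · exact ⟨[y], [x'], rfl, List.singleton_sublist.mpr hy, List.Sublist.refl _⟩

theorem id_num_mem_diffs (l : List Int) (d : Int) :
    d ∈ idNumDiffs l ↔ ∃ y x, List.Sublist [y, x] l ∧ |x - y| = d := by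
  induction l using List.reverseRecOn with
  | nil => simp [idNumDiffs, PySem.Set.empty]
  | append_singleton l x ih =>
    unfold idNumDiffs
    rw [List.foldl_append, List.foldl_cons, List.foldl_nil, id_num_mem_inner_foldl,
        id_num_diffs_snd]
    show (d ∈ idNumDiffs l ∨ _) ↔ _
    simp only [List.nil_append]
    rw [ih]
    constructor
    · rintro (⟨y, x', hs, he⟩ | ⟨y, hy, he⟩)
      · exact ⟨y, x', (id_num_pair_sublist_concat ..).mpr (Or.inl hs), he⟩
      · exact ⟨y, x, (id_num_pair_sublist_concat ..).mpr (Or.inr ⟨rfl, hy⟩), he⟩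
    · rintro ⟨y, x', hs, he⟩
      rcases (id_num_pair_sublist_concat ..).mp hs with hs' | ⟨rfl, hy⟩
      · exact Or.inl ⟨y, x', hs', he⟩
      · exact Or.inr ⟨y, hy, he⟩

theorem id_num_test_eq (arr : List Int) (k : Int) (hk : 1 ≤ k) :
    idNumInnerA k arr [] = (idNumDiffs arr).any (fun d => PySem.Int.mod d k == 0) := by
  have hA := id_num_innerA_false_iff k arr [] List.nodup_nil
  rw [List.nil_append, List.Nodup, List.pairwise_map, List.pairwise_iff_forall_sublist] at hA
  cases hb : idNumInnerA k arr [] with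
  | false =>
    symm; rw [List.any_eq_false]
    intro d hd
    rw [id_num_mem_diffs] at hd
    obtain ⟨y, x, hs, rfl⟩ := hd
    simp only [beq_iff_eq]
    intro hz
    exact (hA.mp hb hs) ((id_num_collide_iff k x y hk).mpr hz).symm
  | true =>
    symm; rw [List.any_eq_true]
    by_contra hall
    push Not at hall
    have hfalse : idNumInnerA k arr [] = false := hA.mpr ?_
    · rw [hb] at hfalse; cases hfalse
    · intro a b hs heq
      have hd := hall |b - a| ((id_num_mem_diffs ..).mpr ⟨a, b, hs, rfl⟩)
      exact hd (by simpa using (id_num_collide_iff k b a hk).mp heq.symm)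

theorem id_num_loop_eq (arr : List Int) (fuel : Nat) (k : Int) (hk : 1 ≤ k) :
    idNumLoopA arr fuel k = idNumLoopB (idNumDiffs arr) fuel k := by
  induction fuel generalizing k with
  | zero => rfl
  | succ n ih =>
    simp only [idNumLoopA, idNumLoopB, ← id_num_test_eq arr k hk]
    split
    · exact ih (k + 1) (by omega)
    · rfl

-- ===== VERDICT (by name: the statement is the Claim_ definition above) =====
theorem id_num_spec : Claim_equal_id_num := by
  intro arr _
  show id_num arr = id_num_alt arr
  exact id_num_loop_eq arr (2 ^ 33) 1 le_rfl
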